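-- pv_equiv track=rewrite | github.com/suttree/HausTones | melodies/stepping.py | notes_from_scale
-- ===== SOURCE A (Python) =====
-- import pprint, random, math, time
--
-- pp = pprint.PrettyPrinter(indent=4)
--
-- def notes_from_scale(starting_note, intervals):
--     pp.pprint(starting_note[0])
--     starting_note = starting_note[0].upper()
--     # Initialize a list to store the notes
--     scale = [starting_note]
--
--     # Calculate the notes in the scale
--     current_note = starting_note
--     for interval in intervals:
--         # Calculate the next note by adding the interval to the current note
--         next_note_index = (ord(current_note) - ord('A') + interval) % 7
--         next_note = chr(ord('A') + next_note_index)
--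
--         # Append the next note to the scale
--         scale.append(next_note)
--
--         # Update the current note for the next iteration
--         current_note = next_note
--
--     return scale
-- ===== SOURCE B (Python) =====
-- # Return-value re-implementation; A's pp.pprint(starting_note[0]) console side effect is not reproduced.
-- def notes_from_scale(starting_note, intervals):
--     note = starting_note[0].upper()
--     base = ord(note) - ord('A')
--     # Closed form: position k depends only on the sum of the first k+1 intervals
--     # (mod-7 addition is associative), so each note is computed independently
--     # from a slice sum and looked up in a letter table — no running note state.
--     return [note] + ["ABCDEFG"[(base + sum(intervals[:k + 1])) % 7]
--                      for k in range(len(intervals))]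
-- ===== Notes on version B (the rewrite author's own statement) =====
-- stated objective: alternative
-- what changed: Replaces A's stateful loop that derives each note from the previous note's character code with a closed form: every position k is computed independently as a table lookup at (base + sum(intervals[:k+1])) % 7, using associativity of mod-7 addition; there is no running note state at all.
-- outside the precondition, e.g. on notes_from_scale(['AB'], []): A returns ['AB'], B raises TypeError
import Mathlib
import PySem

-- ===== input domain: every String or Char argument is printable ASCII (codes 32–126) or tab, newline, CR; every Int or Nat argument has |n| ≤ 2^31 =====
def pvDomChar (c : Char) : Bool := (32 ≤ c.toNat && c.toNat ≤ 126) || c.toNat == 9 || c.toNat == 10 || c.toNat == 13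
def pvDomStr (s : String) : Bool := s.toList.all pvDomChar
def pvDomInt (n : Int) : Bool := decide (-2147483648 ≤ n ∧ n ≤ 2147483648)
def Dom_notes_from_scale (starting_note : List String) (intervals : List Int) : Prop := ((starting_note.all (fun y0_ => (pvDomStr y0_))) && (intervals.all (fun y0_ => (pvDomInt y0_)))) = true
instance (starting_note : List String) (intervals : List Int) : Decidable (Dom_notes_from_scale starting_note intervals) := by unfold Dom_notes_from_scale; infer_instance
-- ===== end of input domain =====

-- B replaces A's stateful note-to-note loop by a closed form: each position is a table lookup at its
-- slice sum mod 7 (alternative decomposition); the pp.pprint call is an output side effect only, not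
-- part of the return value.

-- ord(s) for a single-character string; 0 is only a placeholder outside Pre_ (Python raises TypeError there) — exact on Pre_
def pyOrd (s : String) : Int :=
  match s.toList with
  | [c] => (c.toNat : Int)
  | _ => 0

-- chr(n) — exact for the in-range codes produced here (65..71)
def pyChr (n : Int) : String := String.ofList [Char.ofNat n.toNat]

-- ===== PORT A =====
def notes_from_scale (starting_note : List String) (intervals : List Int) : List String :=
  match starting_note with
  | [] => []   -- starting_note[0] raises IndexError; excluded by Pre_
  | s :: _ =>
    let start := PySem.Str.upper s
    -- scale = [starting_note]; current_note = starting_note; for interval in intervals: …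
    (intervals.foldl
      (fun (st : List String × String) interval =>
        let next_note_index := PySem.Int.mod (pyOrd st.2 - 65 + interval) 7
        let next_note := pyChr (65 + next_note_index)
        (st.1 ++ [next_note], next_note))
      ([start], start)).1

-- ===== PORT B =====
-- "ABCDEFG"[i] — a one-character string; "" only as the out-of-range placeholder (never hit: the index is mod _ 7)
def pvTable (i : Int) : String :=
  match PySem.Str.pyGet? "ABCDEFG" i with
  | some c => String.ofList [c]
  | none => ""

def notes_from_scale_alt (starting_note : List String) (intervals : List Int) : List String :=
  match starting_note with
  | [] => []   -- starting_note[0] raises IndexError; excluded by Pre_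
  | s :: _ =>
    let note := PySem.Str.upper s
    let base := pyOrd note - 65
    -- [note] + ["ABCDEFG"[(base + sum(intervals[:k+1])) % 7] for k in range(len(intervals))]
    [note] ++ (PySem.List.pyRange 0 (intervals.length : Int) 1).map
      (fun k => pvTable (PySem.Int.mod (base + (PySem.List.slice intervals none (some (k + 1))).sum) 7))

-- ===== PRECONDITION & SPEC =====
-- Pre_ requires the first element to be a single character; A additionally returns (just the upper-cased
-- string) when intervals is empty and the first string is longer, since ord is then never called — there
-- B's eager ord raises TypeError, so those inputs are excluded.
def Pre_notes_from_scale (starting_note : List String) (intervals : List Int) : Prop :=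
  starting_note ≠ [] ∧ (starting_note.headD "").toList.length = 1
instance (starting_note : List String) (intervals : List Int) : Decidable (Pre_notes_from_scale starting_note intervals) := by unfold Pre_notes_from_scale; infer_instance

def pvWitness_notes_from_scale : List String × List Int := (["c", "x"], [2, 2, -3, 1])

def Spec_notes_from_scale (starting_note : List String) (intervals : List Int) (out : List String) : Prop := out = notes_from_scale_alt starting_note intervals
instance (starting_note : List String) (intervals : List Int) (out : List String) : Decidable (Spec_notes_from_scale starting_note intervals out) := by unfold Spec_notes_from_scale; infer_instance

-- ===== CLAIM (what is proved, stated in full; the proofs are below) =====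
def Claim_equal_notes_from_scale : Prop := ∀ (starting_note : List String) (intervals : List Int), Dom_notes_from_scale starting_note intervals → Pre_notes_from_scale starting_note intervals → Spec_notes_from_scale starting_note intervals (notes_from_scale starting_note intervals)

-- ===== LEMMAS AND PROOFS =====

-- the letter of an offset t (only its value mod 7 matters)
def pvNote (t : Int) : String := pyChr (65 + PySem.Int.mod t 7)

lemma pvOrd_note (t : Int) : pyOrd (pvNote t) = 65 + PySem.Int.mod t 7 := by
  have h0 : 0 ≤ PySem.Int.mod t 7 := PySem.Int.mod_nonneg t (by norm_num)
  have h7 : PySem.Int.mod t 7 < 7 := PySem.Int.mod_lt t (by norm_num)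
  unfold pvNote pyChr pyOrd
  simp only [String.toList]
  interval_cases h : (PySem.Int.mod t 7) <;> simp <;> rfl

lemma pvNote_mod (t i : Int) : pvNote (PySem.Int.mod t 7 + i) = pvNote (t + i) := by
  unfold pvNote
  congr 2
  simp

-- B's table lookup at an offset reduced mod 7 is exactly the note letter of that offset
lemma pvTable_eq (t : Int) : pvTable (PySem.Int.mod t 7) = pvNote t := by
  have h0 : 0 ≤ PySem.Int.mod t 7 := PySem.Int.mod_nonneg t (by norm_num)
  have h7 : PySem.Int.mod t 7 < 7 := PySem.Int.mod_lt t (by norm_num)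
  unfold pvTable pvNote pyChr
  interval_cases h : (PySem.Int.mod t 7) <;> rfl

-- main loop invariant: A's loop from a note of offset t yields the closed form at every position
set_option maxHeartbeats 1000000 in
lemma pvLoop (iv : List Int) (sc : List String) (t : Int) :
    (iv.foldl
      (fun (st : List String × String) interval =>
        let idx := PySem.Int.mod (pyOrd st.2 - 65 + interval) 7
        let nn := pyChr (65 + idx)
        (st.1 ++ [nn], nn)) (sc, pvNote t)).1
      = sc ++ (List.range iv.length).map (fun k => pvNote (t + (iv.take (k + 1)).sum)) := by
  induction iv generalizing sc t with
  | nil => simp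
  | cons i iv ih =>
      simp only [List.foldl_cons]
      have hn : pyChr (65 + PySem.Int.mod (pyOrd (pvNote t) - 65 + i) 7) = pvNote (t + i) := by
        rw [pvOrd_note]
        have := pvNote_mod t i
        unfold pvNote at this ⊢
        rw [show 65 + PySem.Int.mod t 7 - 65 + i = PySem.Int.mod t 7 + i by ring]
        exact this
      rw [hn, ih]
      rw [List.length_cons, List.range_succ_eq_map]
      simp only [List.map_cons, List.map_map, List.take_succ_cons, List.sum_cons, List.take_zero,
        List.sum_nil, List.append_assoc, List.singleton_append]
      congr 2
      · congr 1; ring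
      · apply List.map_congr_left
        intro k _
        simp only [Function.comp_apply]
        congr 1
        ring

set_option maxHeartbeats 1000000 in
theorem notes_from_scale_spec_aux (starting_note : List String) (intervals : List Int)
    (hne : starting_note ≠ []) :
    notes_from_scale starting_note intervals = notes_from_scale_alt starting_note intervals := by
  match starting_note with
  | [] => exact absurd rfl hne
  | s :: rest =>
    unfold notes_from_scale notes_from_scale_alt
    rw [PySem.List.pyRange_zero_nat]
    simp only [List.map_map]
    have hsl : ∀ k : Nat, PySem.List.slice intervals none (some ((k : Int) + 1))
        = intervals.take (k + 1) := by
      intro k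
      rw [show ((k : Int) + 1) = ((k + 1 : Nat) : Int) by push_cast; ring,
        PySem.List.slice_to_natCast]
    match intervals with
    | [] => simp
    | i :: iv =>
      simp only [List.foldl_cons]
      have hfst : pyChr (65 + PySem.Int.mod (pyOrd (PySem.Str.upper s) - 65 + i) 7)
          = pvNote (pyOrd (PySem.Str.upper s) - 65 + i) := rfl
      rw [hfst, pvLoop]
      rw [List.length_cons, List.range_succ_eq_map]
      simp only [List.map_cons, List.map_map, List.cons_append, List.nil_append]
      refine List.cons_eq_cons.mpr ⟨rfl, List.cons_eq_cons.mpr ⟨?_, ?_⟩⟩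
      · simp only [Function.comp_apply]
        rw [hsl 0, pvTable_eq]
        simp [pvNote]
      · apply List.map_congr_left
        intro k _
        simp only [Function.comp_apply]
        rw [hsl (k + 1), pvTable_eq]
        simp only [List.take_succ_cons, List.sum_cons]
        congr 1
        ring

-- ===== VERDICT (by name: the statement is the Claim_ definition above) =====
theorem notes_from_scale_spec : Claim_equal_notes_from_scale := by
  intro sn iv _ hp
  unfold Spec_notes_from_scale
  exact notes_from_scale_spec_aux sn iv hp.1
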